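-- pv_equiv track=rewrite | github.com/djsmacker01/learningCompanion | app/utils/question_generator.py | _extract_enhanced_answer
-- ===== SOURCE A (Python) =====
-- def _extract_enhanced_answer(description: str) -> str:
--     """Extract better answers from descriptions"""
--
--     # Split into sentences and clean them
--     sentences = [s.strip() for s in description.split('.') if s.strip()]
--
--     # Look for key sentences
--     for sentence in sentences:
--         # Skip very short or very long sentences
--         if 15 <= len(sentence) <= 120:
--             # Look for sentences with key words
--             if any(word in sentence.lower() for word in ['primary', 'main', 'key', 'important', 'benefit', 'advantage', 'purpose', 'function']):
--                 return sentence
--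
--     # Fallback to first reasonable sentence
--     for sentence in sentences:
--         if 20 <= len(sentence) <= 100:
--             return sentence
--
--     # Final fallback
--     return "This concept is important for understanding the topic."
-- ===== SOURCE B (Python) =====
-- def _extract_enhanced_answer(description: str) -> str:
--     """Extract better answers from descriptions (single pass with two first-seen slots)."""
--     keywords = ('primary', 'main', 'key', 'important', 'benefit', 'advantage', 'purpose', 'function')
--     fallback = None
--     for part in description.split('.'):
--         s = part.strip()
--         if not s:
--             continue
--         n = len(s)
--         if 15 <= n <= 120 and any(w in s.lower() for w in keywords):
--             return s
--         if fallback is None and 20 <= n <= 100: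
--             fallback = s
--     if fallback is not None:
--         return fallback
--     return "This concept is important for understanding the topic."
-- ===== Notes on version B (the rewrite author's own statement) =====
-- stated objective: alternative
-- what changed: Replaces building a cleaned sentence list and scanning it twice (keyword pass, then fallback pass) by one streaming pass over the raw split parts that returns on the first keyword match and remembers the first fallback candidate.
import Mathlib
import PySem

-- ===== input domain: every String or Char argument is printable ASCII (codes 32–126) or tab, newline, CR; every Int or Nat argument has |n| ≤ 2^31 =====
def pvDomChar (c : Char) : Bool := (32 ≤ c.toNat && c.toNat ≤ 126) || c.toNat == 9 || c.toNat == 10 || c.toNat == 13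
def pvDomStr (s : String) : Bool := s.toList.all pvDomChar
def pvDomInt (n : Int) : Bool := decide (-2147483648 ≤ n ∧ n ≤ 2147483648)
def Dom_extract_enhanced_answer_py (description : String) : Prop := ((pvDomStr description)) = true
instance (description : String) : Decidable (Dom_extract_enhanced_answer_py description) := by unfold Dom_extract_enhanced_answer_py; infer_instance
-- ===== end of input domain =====

-- B is an alternative decomposition: one streaming pass with an early return and a first-seen
-- fallback slot, instead of A's cleaned list scanned twice.  Return value only; no mutation.

-- shared predicates (the same tests both Pythons perform)
def pvKeywords : List String :=
  ["primary", "main", "key", "important", "benefit", "advantage", "purpose", "function"]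

def pvKw (s : String) : Bool :=
  pvKeywords.any (fun w => PySem.Str.isIn w (PySem.Str.lower s))

def pvLenOK1 (s : String) : Bool := 15 ≤ PySem.Str.len s && PySem.Str.len s ≤ 120
def pvLenOK2 (s : String) : Bool := 20 ≤ PySem.Str.len s && PySem.Str.len s ≤ 100

def pvDefault : String := "This concept is important for understanding the topic."

-- ===== PORT A =====
-- description.split('.') — sep "." is nonempty, so split? always returns some
def pvSplit (description : String) : List String :=
  (PySem.Str.split? description ".").getD []

-- [s.strip() for s in description.split('.') if s.strip()]
def pvSentences (description : String) : List String :=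
  ((pvSplit description).filter (fun s => PySem.Str.strip s ≠ "")).map PySem.Str.strip

-- first loop: keyword pass
def pvLoopA1 : List String → Option String
  | [] => none
  | s :: rest => if pvLenOK1 s then (if pvKw s then some s else pvLoopA1 rest) else pvLoopA1 rest

-- second loop: fallback pass
def pvLoopA2 : List String → Option String
  | [] => none
  | s :: rest => if pvLenOK2 s then some s else pvLoopA2 rest

def extract_enhanced_answer_py (description : String) : String :=
  let sentences := pvSentences description
  match pvLoopA1 sentences with
  | some s => s
  | none =>
    match pvLoopA2 sentences with
    | some s => s
    | none => pvDefault

-- ===== PORT B =====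
-- one pass over the raw parts of description.split('.'); `fb` is the first-seen fallback slot
def pvLoopB : List String → Option String → String
  | [], fb => match fb with | some s => s | none => pvDefault
  | p :: rest, fb =>
    let s := PySem.Str.strip p
    if s = "" then pvLoopB rest fb
    else if pvLenOK1 s && pvKw s then s
    else if fb.isNone && pvLenOK2 s then pvLoopB rest (some s)
    else pvLoopB rest fb

def extract_enhanced_answer_py_alt (description : String) : String :=
  pvLoopB (pvSplit description) none

-- ===== PRECONDITION & SPEC =====
def Spec_extract_enhanced_answer_py (description : String) (out : String) : Prop := out = extract_enhanced_answer_py_alt description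
instance (description : String) (out : String) : Decidable (Spec_extract_enhanced_answer_py description out) := by unfold Spec_extract_enhanced_answer_py; infer_instance

-- ===== CLAIM (what is proved, stated in full; the proofs are below) =====
def Claim_equal_extract_enhanced_answer_py : Prop := ∀ (description : String), Dom_extract_enhanced_answer_py description → Spec_extract_enhanced_answer_py description (extract_enhanced_answer_py description)

-- ===== LEMMAS AND PROOFS =====

-- cleaned sentences of a raw parts list
def pvClean (parts : List String) : List String :=
  (parts.filter (fun s => PySem.Str.strip s ≠ "")).map PySem.Str.strip

-- the single pass computes the two-pass answer, for any fallback slot state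
theorem pvLoopB_eq (parts : List String) (fb : Option String) :
    pvLoopB parts fb =
      match pvLoopA1 (pvClean parts) with
      | some s => s
      | none =>
        match fb.or (pvLoopA2 (pvClean parts)) with
        | some s => s
        | none => pvDefault := by
  induction parts generalizing fb with
  | nil => cases fb <;> simp [pvLoopB, pvClean, pvLoopA1, pvLoopA2]
  | cons p rest ih =>
    by_cases hs : PySem.Str.strip p = ""
    · simp [pvLoopB, pvClean, hs, ih]
    · have hcl : pvClean (p :: rest) = PySem.Str.strip p :: pvClean rest := by
        simp [pvClean, hs]
      cases hL : pvLenOK1 (PySem.Str.strip p) <;> cases hK : pvKw (PySem.Str.strip p)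
      · cases fb <;> by_cases h2 : pvLenOK2 (PySem.Str.strip p) = true <;>
          simp [pvLoopB, hs, hL, hK, hcl, pvLoopA1, pvLoopA2, ih, h2, Option.or]
      · cases fb <;> by_cases h2 : pvLenOK2 (PySem.Str.strip p) = true <;>
          simp [pvLoopB, hs, hL, hK, hcl, pvLoopA1, pvLoopA2, ih, h2, Option.or]
      · cases fb <;> by_cases h2 : pvLenOK2 (PySem.Str.strip p) = true <;>
          simp [pvLoopB, hs, hL, hK, hcl, pvLoopA1, pvLoopA2, ih, h2, Option.or]
      · simp [pvLoopB, hs, hL, hK, hcl, pvLoopA1]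

-- ===== VERDICT (by name: the statement is the Claim_ definition above) =====
theorem extract_enhanced_answer_py_spec : Claim_equal_extract_enhanced_answer_py := by
  intro description _
  unfold Spec_extract_enhanced_answer_py extract_enhanced_answer_py extract_enhanced_answer_py_alt
  rw [pvLoopB_eq]
  rfl
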